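-- pv_equiv track=rewrite | github.com/thaReal/MasterChef | codeforces/round_673/k-amazing.py | solve
-- ===== SOURCE A (Python) =====
-- def get_amazing_number(n, a, k):
-- 	s = set(a[:k])
-- 	for i in range(1, n-k+1):
-- 		s.intersection_update(a[i:i+k])
--
-- 		if len(s) == 0:
-- 			return -1
--
-- 	return min(s)
--
-- def solve(n, a):
-- 	sol = [-1] * n
-- 	mn = min(a)
-- 	sol[-1] = mn
--
-- 	left = 1
-- 	right = n-1
--
-- 	while left < right:
-- 		sol[left] = get_amazing_number(n,a,left+1)
-- 		sol[right] = get_amazing_number(n,a,right+1)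
--
-- 		if sol[left] != sol[right]:
-- 			left += 1
-- 			right -= 1
--
-- 		else:
-- 			for i in range(left+1, right):
-- 				sol[i] = sol[left]
-- 			break
--
--
-- 	return ' '.join([str(x) for x in sol])
-- ===== SOURCE B (Python) =====
-- def solve(n, a):
--     # Precompute the whole table f[k] (k = 1..n) of k-amazing numbers at once:
--     # a value v appears in every window a[i:i+k] (0 <= i <= n-k) iff the maximum
--     # gap between its consecutive occurrences (sentinels -1 and n) is at most k.
--     t = min(n, len(a))               # windows only ever reach indices below this
--     best = [None] * (n + 1)          # best[g] = smallest value whose max gap is g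
--     for idx in range(t):
--         v = a[idx]
--         if v in a[:idx]:             # only handle the first occurrence of v
--             continue
--         g = 0
--         last = -1
--         for i in range(idx, t):
--             if a[i] == v:
--                 if i - last > g:
--                     g = i - last
--                 last = i
--         if n - last > g:
--             g = n - last
--         if best[g] is None or v < best[g]:
--             best[g] = v
--     f = [0] * (n + 1)                # f[k] = k-amazing number (-1 if none)
--     cur = None
--     for k in range(1, n + 1):
--         b = best[k]
--         if b is not None and (cur is None or b < cur):
--             cur = b
--         f[k] = -1 if cur is None else cur
--     # Same output rule as the original: fill from both ends, stop early on a tie.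
--     sol = [-1] * n
--     sol[-1] = min(a)
--     l = 1
--     r = n - 1
--     while l < r:
--         sol[l] = f[l + 1]
--         sol[r] = f[r + 1]
--         if sol[l] != sol[r]:
--             l += 1
--             r -= 1
--         else:
--             for i in range(l + 1, r):
--                 sol[i] = sol[l]
--             break
--     return ' '.join(str(x) for x in sol)
-- ===== Notes on version B (the rewrite author's own statement) =====
-- stated objective: alternative
-- what changed: B precomputes the whole table of k-amazing numbers at once via each value's maximum occurrence gap (a value appears in every length-k window iff its max gap is at most k) plus a prefix-minimum sweep, instead of A's per-k repeated set intersections over all windows; A's two-pointer early-stop output rule is kept unchanged so outputs are identical.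
import Mathlib
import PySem

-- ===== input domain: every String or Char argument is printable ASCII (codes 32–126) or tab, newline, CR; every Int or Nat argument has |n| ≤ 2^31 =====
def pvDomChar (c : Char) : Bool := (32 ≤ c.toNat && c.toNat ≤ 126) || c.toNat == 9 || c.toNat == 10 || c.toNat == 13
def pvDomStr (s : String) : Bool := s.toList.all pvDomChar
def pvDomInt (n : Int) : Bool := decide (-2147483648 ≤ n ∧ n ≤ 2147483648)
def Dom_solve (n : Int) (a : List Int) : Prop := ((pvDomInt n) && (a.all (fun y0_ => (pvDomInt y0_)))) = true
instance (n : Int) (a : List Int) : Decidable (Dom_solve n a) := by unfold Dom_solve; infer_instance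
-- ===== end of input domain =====

-- B replaces A's per-k repeated window-set intersections by one max-occurrence-gap table and a
-- prefix-minimum sweep, keeping A's two-pointer early-stop output rule, so outputs are identical.

-- ===== PORT A =====

-- the loop of get_amazing_number: 'for i in range(1, n-k+1): s &= set(a[i:i+k]); if empty: -1' then 'min(s)'
def gaLoop (a : List Int) (k : Int) (idxs : List Int) (s : PySem.Set Int) : Int :=
  match idxs with
  | [] => (PySem.List.min? s (fun x => x)).getD (-1)  -- min(s); s is provably nonempty whenever this is reached under Pre_, the default is never used
  | i :: rest =>
    let s' := PySem.Set.inter s (PySem.List.slice a (some i) (some (i + k)))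
    if PySem.Set.len s' = 0 then -1 else gaLoop a k rest s'

def get_amazing_number (n : Int) (a : List Int) (k : Int) : Int :=
  gaLoop a k (PySem.List.pyRange 1 (n - k + 1) 1) (PySem.Set.ofList (PySem.List.slice a none (some k)))

-- the while-loop of solve
def solveLoop (n : Int) (a : List Int) (sol : List Int) (left right : Int) : List Int :=
  if left < right then
    let sol1 := PySem.List.pySetD sol left (get_amazing_number n a (left + 1))
    let sol2 := PySem.List.pySetD sol1 right (get_amazing_number n a (right + 1))
    if PySem.List.pyGetD sol2 left 0 ≠ PySem.List.pyGetD sol2 right 0 then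
      solveLoop n a sol2 (left + 1) (right - 1)
    else
      (PySem.List.pyRange (left + 1) right 1).foldl
        (fun s i => PySem.List.pySetD s i (PySem.List.pyGetD s left 0)) sol2
  else sol
termination_by (right - left).toNat
decreasing_by omega

def solve (n : Int) (a : List Int) : String :=
  let sol0 := List.replicate n.toNat (-1 : Int)
  let mn := (PySem.List.min? a (fun x => x)).getD (-1)   -- min(a); raises only on a = [], which Pre_ excludes
  let sol1 := PySem.List.pySetD sol0 (-1) mn
  let res := solveLoop n a sol1 1 (n - 1)
  PySem.Str.join " " (res.map (fun x => PySem.Int.toStr x))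

-- ===== PORT B =====

-- inner scan: g/last accumulation over i in range(idx, t)
def altInner (t : Int) (a : List Int) (idx : Int) (v : Int) : Int × Int :=
  (PySem.List.pyRange idx t 1).foldl
    (fun (p : Int × Int) i =>
      if PySem.List.pyGetD a i 0 = v then
        (if i - p.2 > p.1 then i - p.2 else p.1, i)
      else p) (0, -1)

-- best[g] = smallest value whose max occurrence gap is g  (t = min(n, len(a)))
def altBest (n : Int) (a : List Int) : List (Option Int) :=
  (PySem.List.pyRange 0 (min n (a.length : Int)) 1).foldl
    (fun best idx =>
      let v := PySem.List.pyGetD a idx 0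
      if (PySem.List.slice a none (some idx)).contains v then best
      else
        let p := altInner (min n (a.length : Int)) a idx v
        let g := if n - p.2 > p.1 then n - p.2 else p.1
        match PySem.List.pyGetD best g none with
        | none => PySem.List.pySetD best g (some v)
        | some b => if v < b then PySem.List.pySetD best g (some v) else best)
    (List.replicate (n + 1).toNat (none : Option Int))

-- f[k] = k-amazing number, prefix minimum sweep over best
def altF (n : Int) (a : List Int) : List Int :=
  let best := altBest n a
  ((PySem.List.pyRange 1 (n + 1) 1).foldl
    (fun (p : List Int × Option Int) k =>
      let b := PySem.List.pyGetD best k none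
      let cur := match b, p.2 with
        | some bv, none => some bv
        | some bv, some c => if bv < c then some bv else some c
        | none, c => c
      (PySem.List.pySetD p.1 k (cur.getD (-1)), cur))
    (List.replicate (n + 1).toNat (0 : Int), none)).1

-- same output rule as A, reading the precomputed table
def altLoop (f : List Int) (sol : List Int) (l r : Int) : List Int :=
  if l < r then
    let sol1 := PySem.List.pySetD sol l (PySem.List.pyGetD f (l + 1) 0)
    let sol2 := PySem.List.pySetD sol1 r (PySem.List.pyGetD f (r + 1) 0)
    if PySem.List.pyGetD sol2 l 0 ≠ PySem.List.pyGetD sol2 r 0 then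
      altLoop f sol2 (l + 1) (r - 1)
    else
      (PySem.List.pyRange (l + 1) r 1).foldl
        (fun s i => PySem.List.pySetD s i (PySem.List.pyGetD s l 0)) sol2
  else sol
termination_by (r - l).toNat
decreasing_by omega

def solve_alt (n : Int) (a : List Int) : String :=
  let f := altF n a
  let sol0 := List.replicate n.toNat (-1 : Int)
  let sol1 := PySem.List.pySetD sol0 (-1) ((PySem.List.min? a (fun x => x)).getD (-1))  -- sol[-1] = min(a); raises only on a = [], excluded by Pre_
  let res := altLoop f sol1 1 (n - 1)
  PySem.Str.join " " (res.map (fun x => PySem.Int.toStr x))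

-- ===== PRECONDITION & SPEC =====
-- Pre_ excludes exactly the inputs on which A raises: a = [] (min(a) raises ValueError)
-- and n ≤ 0 (sol = [-1]*n is empty, so sol[-1] = mn raises IndexError).
def Pre_solve (n : Int) (a : List Int) : Prop := 1 ≤ n ∧ a ≠ []
instance (n : Int) (a : List Int) : Decidable (Pre_solve n a) := by unfold Pre_solve; infer_instance
def pvWitness_solve : Int × List Int := (3, [1, 2, 1])

def Spec_solve (n : Int) (a : List Int) (out : String) : Prop := out = solve_alt n a
instance (n : Int) (a : List Int) (out : String) : Decidable (Spec_solve n a out) := by unfold Spec_solve; infer_instance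

-- ===== CLAIM (what is proved, stated in full; the proofs are below) =====
def Claim_equal_solve : Prop := ∀ (n : Int) (a : List Int), Dom_solve n a → Pre_solve n a → Spec_solve n a (solve n a)

-- ===== LEMMAS AND PROOFS =====

-- abstract "minimum of a set of ints, -1 if empty" (the -1 is also a possible minimum; both ports produce it)
def IsRes (S : Int → Prop) (r : Int) : Prop :=
  ((∀ v, ¬ S v) ∧ r = -1) ∨ (S r ∧ ∀ v, S v → r ≤ v)

theorem IsRes_unique {S : Int → Prop} {r r' : Int} (h : IsRes S r) (h' : IsRes S r') : r = r' := by
  rcases h with ⟨he, rfl⟩ | ⟨hm, hmin⟩ <;> rcases h' with ⟨he', rfl⟩ | ⟨hm', hmin'⟩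
  · rfl
  · exact absurd hm' (he _)
  · exact absurd hm (he' _)
  · exact le_antisymm (hmin _ hm') (hmin' _ hm)

theorem IsRes_congr {S S' : Int → Prop} {r : Int} (h : ∀ v, S v ↔ S' v) (hr : IsRes S r) : IsRes S' r := by
  rcases hr with ⟨he, rfl⟩ | ⟨hm, hmin⟩
  · exact Or.inl ⟨fun v hv => he v ((h v).mpr hv), rfl⟩
  · exact Or.inr ⟨(h r).mp hm, fun v hv => hmin v ((h v).mpr hv)⟩

-- max gap of a (sorted) occurrence list with sentinels 'last' in front and m at the end
def gmChain (m : Int) : Int → List Int → Int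
  | last, [] => m - last
  | last, x :: xs => max (x - last) (gmChain m x xs)

-- occurrences of v among the indices the windows can reach, i.e. in a[:min(n, len(a))]
def occZ (n : Int) (a : List Int) (v : Int) : List Int :=
  (PySem.List.pyRange 0 (min n (a.length : Int)) 1).filter (fun i => PySem.List.pyGetD a i 0 == v)

def G (n : Int) (a : List Int) (v : Int) : Int := gmChain n (-1) (occZ n a v)

def minRes (l : List Int) : Int := (PySem.List.min? l (fun x => x)).getD (-1)

theorem minRes_IsRes (l : List Int) : IsRes (fun v => v ∈ l) (minRes l) := by
  unfold minRes
  cases hmin : PySem.List.min? l (fun x => x) with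
  | none =>
    left
    refine ⟨?_, rfl⟩
    intro v hv
    rw [(PySem.List.min?_eq_none_iff l (fun x => x)).mp hmin] at hv
    exact absurd hv (List.not_mem_nil)
  | some x =>
    right
    refine ⟨PySem.List.min?_mem hmin, ?_⟩
    intro v hv
    simpa using PySem.List.min?_isMin hmin v hv

theorem minRes_congr {l1 l2 : List Int} (h : ∀ x, x ∈ l1 ↔ x ∈ l2) : minRes l1 = minRes l2 :=
  IsRes_unique (IsRes_congr h (minRes_IsRes l1)) (minRes_IsRes l2)

-- slice membership, nonnegative start
theorem mem_slice_iff (a : List Int) (i k v : Int) (hi : 0 ≤ i) (hk : 0 < k) :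
    v ∈ PySem.List.slice a (some i) (some (i + k)) ↔
      ∃ j : Int, 0 ≤ j ∧ j < (a.length : Int) ∧ i ≤ j ∧ j < i + k ∧ PySem.List.pyGetD a j 0 = v := by
  rw [PySem.List.slice_toNat a hi (by omega)]
  rw [List.mem_iff_getElem]
  constructor
  · rintro ⟨u, hu, hval⟩
    have hlen : (((a.drop i.toNat).take ((i + k).toNat - i.toNat)).length) =
        min ((i + k).toNat - i.toNat) (a.length - i.toNat) := by simp
    rw [hlen] at hu
    refine ⟨((i.toNat + u : ℕ) : Int), by omega, by omega, by omega, by omega, ?_⟩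
    rw [PySem.List.pyGetD_natCast]
    rw [List.getElem_take, List.getElem_drop] at hval
    rw [List.getD_eq_getElem _ _ (by omega)]
    exact hval
  · rintro ⟨j, hj0, hjm, hij, hjk, hval⟩
    have hj : j = ((j.toNat : ℕ) : Int) := by omega
    refine ⟨j.toNat - i.toNat, ?_, ?_⟩
    · simp
      omega
    · rw [List.getElem_take, List.getElem_drop]
      rw [hj, PySem.List.pyGetD_natCast] at hval
      rw [List.getD_eq_getElem _ _ (by omega)] at hval
      have hgc : ∀ (x y : ℕ) (h : x = y) (hx : x < a.length) (hy : y < a.length), a[x] = a[y] := by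
        intro x y h hx hy; subst h; rfl
      rw [hgc _ j.toNat (by omega) (by omega) (by omega)]
      exact hval

theorem mem_occZ (n : Int) (a : List Int) (v j : Int) :
    j ∈ occZ n a v ↔ 0 ≤ j ∧ j < min n (a.length : Int) ∧ PySem.List.pyGetD a j 0 = v := by
  unfold occZ
  rw [List.mem_filter, PySem.List.mem_pyRange_one]
  simp only [beq_iff_eq]
  tauto

theorem occZ_pairwise (n : Int) (a : List Int) (v : Int) : (occZ n a v).Pairwise (· < ·) :=
  (PySem.List.pairwise_lt_pyRange_one 0 (min n (a.length : Int))).filter _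

-- ===== A side =====

theorem gaLoop_eq (a : List Int) (k : Int) (L : List Int) (s : PySem.Set Int) :
    gaLoop a k L s =
      minRes (s.filter (fun v => L.all (fun i => (PySem.List.slice a (some i) (some (i + k))).contains v))) := by
  induction L generalizing s with
  | nil =>
    simp only [gaLoop, List.all_nil, List.filter_true]
    rfl
  | cons i rest ih =>
    simp only [gaLoop]
    by_cases hlen : PySem.Set.len (PySem.Set.inter s (PySem.List.slice a (some i) (some (i + k)))) = 0
    · rw [if_pos hlen]
      have hnil : s.filter (fun v => (i :: rest).all (fun i' => (PySem.List.slice a (some i') (some (i' + k))).contains v)) = [] := by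
        rw [List.eq_nil_iff_forall_not_mem]
        intro x hx
        rw [List.mem_filter] at hx
        obtain ⟨hxs, hpred⟩ := hx
        rw [List.all_cons, Bool.and_eq_true] at hpred
        have hxin : x ∈ PySem.Set.inter s (PySem.List.slice a (some i) (some (i + k))) := by
          rw [PySem.Set.mem_inter]
          exact ⟨hxs, by simpa using hpred.1⟩
        have hnil2 : PySem.Set.inter s (PySem.List.slice a (some i) (some (i + k))) = [] := by
          simp only [PySem.Set.len] at hlen
          exact List.length_eq_zero_iff.mp (by exact_mod_cast hlen)
        rw [hnil2] at hxin
        exact absurd hxin (List.not_mem_nil)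
      rw [hnil]
      rfl
    · rw [if_neg hlen, ih]
      apply minRes_congr
      intro x
      rw [List.mem_filter, List.mem_filter, PySem.Set.mem_inter, List.all_cons, Bool.and_eq_true]
      constructor
      · rintro ⟨⟨hs, hw⟩, hrest⟩
        exact ⟨hs, by simpa using hw, hrest⟩
      · rintro ⟨hs, hw, hrest⟩
        exact ⟨⟨hs, by simpa using hw⟩, hrest⟩

-- ===== gap chain: order lemmas =====

theorem gmChain_le_sub (m last : Int) (L : List Int) (hL : L.Pairwise (· < ·))
    (h : ∀ x ∈ L, last < x ∧ x < m) : gmChain m last L ≤ m - last := by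
  induction L generalizing last with
  | nil => simp [gmChain]
  | cons x xs ih =>
    rcases List.pairwise_cons.mp hL with ⟨hxlt, hxs⟩
    have hx := h x List.mem_cons_self
    have hrec := ih x hxs (fun y hy => ⟨hxlt y hy, (h y (List.mem_cons_of_mem _ hy)).2⟩)
    simp only [gmChain, max_le_iff]
    omega

theorem chain_le_iff (m k : Int) (L : List Int) (last : Int)
    (hL : L.Pairwise (· < ·)) (hmem : ∀ x ∈ L, last < x ∧ x < m) :
    gmChain m last L ≤ k ↔ ∀ i : Int, last < i → i + k ≤ m → ∃ j ∈ L, i ≤ j ∧ j < i + k := by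
  induction L generalizing last with
  | nil =>
    simp only [gmChain]
    constructor
    · intro hle i hi hik
      exfalso; omega
    · intro H
      by_contra hgt
      obtain ⟨j, hj, _⟩ := H (last + 1) (by omega) (by omega)
      exact absurd hj (List.not_mem_nil)
  | cons x xs ih =>
    rcases List.pairwise_cons.mp hL with ⟨hxlt, hxs⟩
    have hx := hmem x List.mem_cons_self
    have IH := ih x hxs (fun y hy => ⟨hxlt y hy, (hmem y (List.mem_cons_of_mem _ hy)).2⟩)
    simp only [gmChain, max_le_iff]
    constructor
    · rintro ⟨h1, h2⟩ i hi hik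
      by_cases hix : i ≤ x
      · exact ⟨x, List.mem_cons_self, hix, by omega⟩
      · obtain ⟨j, hj, hj1, hj2⟩ := (IH.mp h2) i (by omega) hik
        exact ⟨j, List.mem_cons_of_mem _ hj, hj1, hj2⟩
    · intro H
      constructor
      · by_cases hc : last + 1 + k ≤ m
        · obtain ⟨j, hj, hj1, hj2⟩ := H (last + 1) (by omega) (by omega)
          have hxj : x ≤ j := by
            rcases List.mem_cons.mp hj with rfl | hj'
            · exact le_refl _
            · exact le_of_lt (hxlt j hj')
          omega
        · omega
      · rw [IH]
        intro i hi hik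
        obtain ⟨j, hj, hj1, hj2⟩ := H i (by omega) hik
        rcases List.mem_cons.mp hj with rfl | hj'
        · exact absurd hj1 (by omega)
        · exact ⟨j, hj', hj1, hj2⟩

-- ===== G: windows characterisation and bounds =====

theorem mem_take_getElem (a : List Int) (u t : ℕ) (hu : u < a.length) (hut : u < t) :
    a[u] ∈ a.take t := by
  rw [List.mem_iff_getElem]
  refine ⟨u, by simp; omega, ?_⟩
  rw [List.getElem_take]

theorem G_windows (n : Int) (a : List Int) (v k : Int) (hk1 : 1 ≤ k) (hk2 : k ≤ n) :
    (v ∈ a ∧ G n a v ≤ k) ↔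
      (v ∈ PySem.List.slice a none (some k) ∧
        ∀ i : Int, 1 ≤ i → i ≤ n - k → v ∈ PySem.List.slice a (some i) (some (i + k))) := by
  have hchain := chain_le_iff n k (occZ n a v) (-1) (occZ_pairwise n a v) (by
    intro x hx; rw [mem_occZ] at hx; omega)
  have hwin : ∀ i : Int, 0 ≤ i → i + k ≤ n →
      ((∃ j ∈ occZ n a v, i ≤ j ∧ j < i + k) ↔ v ∈ PySem.List.slice a (some i) (some (i + k))) := by
    intro i hi hik
    rw [mem_slice_iff a i k v hi (by omega)]
    constructor
    · rintro ⟨j, hj, hj1, hj2⟩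
      rw [mem_occZ] at hj
      exact ⟨j, hj.1, by omega, hj1, hj2, hj.2.2⟩
    · rintro ⟨j, h0, h1, h2, h3, h4⟩
      exact ⟨j, (mem_occZ n a v j).mpr ⟨h0, by omega, h4⟩, h2, h3⟩
  have hzero : PySem.List.slice a (some 0) (some (0 + k)) = PySem.List.slice a none (some k) := by
    simp
  constructor
  · rintro ⟨hv, hG⟩
    rw [G, hchain] at hG
    constructor
    · rw [← hzero]
      exact (hwin 0 (le_refl _) (by omega)).mp (hG 0 (by omega) (by omega))
    · intro i hi hik
      exact (hwin i (by omega) (by omega)).mp (hG i (by omega) (by omega))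
  · rintro ⟨h0, hrest⟩
    refine ⟨PySem.List.mem_of_mem_slice a none (some k) h0, ?_⟩
    rw [G, hchain]
    intro i hi hik
    rcases eq_or_lt_of_le (by omega : (0 : Int) ≤ i) with heq | hpos
    · subst heq
      rw [hwin 0 (le_refl _) (by omega), hzero]
      exact h0
    · rw [hwin i (by omega) (by omega)]
      exact hrest i (by omega) (by omega)

theorem G_pos (n : Int) (a : List Int) (v : Int) (hn : 0 ≤ n) : 1 ≤ G n a v := by
  unfold G
  cases hocc : occZ n a v with
  | nil => simp only [gmChain]; omega
  | cons x xs =>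
    have hx : x ∈ occZ n a v := by rw [hocc]; exact List.mem_cons_self
    rw [mem_occZ] at hx
    simp only [gmChain]
    have : 1 ≤ x - (-1) := by omega
    exact le_trans this (le_max_left _ _)

theorem G_le (n : Int) (a : List Int) (v : Int)
    (hv : v ∈ a.take (min n (a.length : Int)).toNat) : G n a v ≤ n := by
  obtain ⟨u, hu, hval⟩ := List.mem_iff_getElem.mp hv
  have hu2 : u < (min n (a.length : Int)).toNat := by
    have := hu
    simp at this
    omega
  rw [List.getElem_take] at hval
  have humem : ((u : ℕ) : Int) ∈ occZ n a v := by
    rw [mem_occZ]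
    have hulen : u < a.length := by
      have hle := List.length_take_le (min n (a.length : Int)).toNat a
      omega
    refine ⟨by omega, by omega, ?_⟩
    rw [PySem.List.pyGetD_natCast, List.getD_eq_getElem _ _ hulen]
    exact hval
  unfold G
  cases hocc : occZ n a v with
  | nil => rw [hocc] at humem; exact absurd humem (List.not_mem_nil)
  | cons x xs =>
    have hpw := occZ_pairwise n a v
    rw [hocc] at hpw
    rcases List.pairwise_cons.mp hpw with ⟨hxlt, hxs⟩
    have hbnd : ∀ y ∈ x :: xs, 0 ≤ y ∧ y < n := by
      intro y hy
      have hyo : y ∈ occZ n a v := by rw [hocc]; exact hy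
      rw [mem_occZ] at hyo
      omega
    have hx := hbnd x List.mem_cons_self
    have hsub := gmChain_le_sub n x xs hxs (fun y hy =>
      ⟨hxlt y hy, (hbnd y (List.mem_cons_of_mem _ hy)).2⟩)
    simp only [gmChain]
    rw [max_le_iff]
    omega

theorem mem_take_of_G_le (n : Int) (a : List Int) (v : Int) (hn : 0 ≤ n)
    (hG : G n a v ≤ n) : v ∈ a.take (min n (a.length : Int)).toNat := by
  rcases hocc : occZ n a v with _ | ⟨x, xs⟩
  · exfalso
    unfold G at hG
    rw [hocc] at hG
    simp only [gmChain] at hG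
    omega
  · have hx : x ∈ occZ n a v := by rw [hocc]; exact List.mem_cons_self
    rw [mem_occZ] at hx
    obtain ⟨hx0, hxlt, hxval⟩ := hx
    have hxm : x.toNat < a.length := by omega
    rw [PySem.List.pyGetD_eq_getElem a (0 : Int) hx0 (by omega)] at hxval
    rw [← hxval]
    exact mem_take_getElem a x.toNat (min n (a.length : Int)).toNat hxm (by omega)

theorem A_IsRes (n : Int) (a : List Int) (k : Int) (hk1 : 1 ≤ k) (hk2 : k ≤ n) :
    IsRes (fun v => v ∈ a ∧ G n a v ≤ k) (get_amazing_number n a k) := by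
  unfold get_amazing_number
  rw [gaLoop_eq]
  apply IsRes_congr _ (minRes_IsRes _)
  intro x
  rw [List.mem_filter, PySem.Set.mem_ofList]
  rw [G_windows n a x k hk1 hk2]
  constructor
  · rintro ⟨hs, hpred⟩
    rw [List.all_eq_true] at hpred
    refine ⟨hs, ?_⟩
    intro i hi hik
    have hmem : i ∈ PySem.List.pyRange 1 (n - k + 1) 1 := by
      rw [PySem.List.mem_pyRange_one]
      omega
    have := hpred i hmem
    simpa using this
  · rintro ⟨h0, hrest⟩
    refine ⟨h0, ?_⟩
    rw [List.all_eq_true]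
    intro i hmem
    rw [PySem.List.mem_pyRange_one] at hmem
    have := hrest i (by omega) (by omega)
    simpa using this

-- ===== B side =====

-- the inner scan computes the max gap of the occurrences in [s, T), closed with sentinel n
theorem altInner_chain (a : List Int) (v : Int) (T n : Int) (s : Int) (h0 : 0 ≤ s)
    (g0 last0 : Int) :
    (if n - ((PySem.List.pyRange s T 1).foldl
          (fun (p : Int × Int) i =>
            if PySem.List.pyGetD a i 0 = v then
              (if i - p.2 > p.1 then i - p.2 else p.1, i)
            else p) (g0, last0)).2 >
        ((PySem.List.pyRange s T 1).foldl
          (fun (p : Int × Int) i =>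
            if PySem.List.pyGetD a i 0 = v then
              (if i - p.2 > p.1 then i - p.2 else p.1, i)
            else p) (g0, last0)).1 then
      n - ((PySem.List.pyRange s T 1).foldl
          (fun (p : Int × Int) i =>
            if PySem.List.pyGetD a i 0 = v then
              (if i - p.2 > p.1 then i - p.2 else p.1, i)
            else p) (g0, last0)).2
    else
      ((PySem.List.pyRange s T 1).foldl
          (fun (p : Int × Int) i =>
            if PySem.List.pyGetD a i 0 = v then
              (if i - p.2 > p.1 then i - p.2 else p.1, i)
            else p) (g0, last0)).1) =
      max g0 (gmChain n last0
        (((PySem.List.pyRange s T 1)).filter (fun i => PySem.List.pyGetD a i 0 == v))) := by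
  generalize hd : (T - s).toNat = d
  induction d generalizing s g0 last0 with
  | zero =>
    rw [PySem.List.pyRange_one_eq_nil (by omega)]
    simp only [List.foldl_nil, List.filter_nil, gmChain]
    omega
  | succ d ih =>
    rw [PySem.List.pyRange_one_cons (by omega)]
    simp only [List.foldl_cons, List.filter_cons]
    by_cases hv : PySem.List.pyGetD a s 0 = v
    · have hpred : (PySem.List.pyGetD a s 0 == v) = true := by simpa using hv
      simp only [hv, beq_self_eq_true, if_true]
      have hstep : (if s - last0 > g0 then s - last0 else g0) = max g0 (s - last0) := by omega
      rw [hstep, ih (s + 1) (by omega) _ _ (by omega)]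
      simp only [gmChain]
      rw [max_assoc]
    · have hpred : (PySem.List.pyGetD a s 0 == v) = false := by simpa using hv
      simp only [if_neg hv, hpred, Bool.false_eq_true, if_false]
      exact ih (s + 1) (by omega) _ _ (by omega)

def IsMinOpt (S : Int → Prop) : Option Int → Prop
  | none => ∀ v, ¬ S v
  | some x => S x ∧ ∀ v, S v → x ≤ v

theorem IsMinOpt_congr {S S' : Int → Prop} {o : Option Int} (h : ∀ v, S v ↔ S' v) (ho : IsMinOpt S o) :
    IsMinOpt S' o := by
  cases o with
  | none => exact fun v hv => ho v ((h v).mpr hv)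
  | some x => exact ⟨(h x).mp ho.1, fun v hv => ho.2 v ((h v).mpr hv)⟩

theorem take_succ_eq (a : List Int) (t : ℕ) (ht : t < a.length) :
    a.take (t + 1) = a.take t ++ [a[t]] := by
  rw [List.take_add_one, List.getElem?_eq_getElem ht]
  rfl

theorem pyGetD_set {α : Type} (best : List α) (g g' : Int) (d : α) (hg : 0 ≤ g) (hg' : 0 ≤ g')
    (hlt : g.toNat < best.length) (w : α) :
    PySem.List.pyGetD (PySem.List.pySetD best g w) g' d =
      if g' = g then w else PySem.List.pyGetD best g' d := by
  have hcast : g = ((g.toNat : ℕ) : Int) := by omega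
  have hcast' : g' = ((g'.toNat : ℕ) : Int) := by omega
  rw [hcast, hcast', PySem.List.pyGetD_pySetD_natCast best g.toNat g'.toNat w d hlt]
  by_cases h : g'.toNat = g.toNat
  · rw [if_pos h, if_pos (by omega : ((g'.toNat : ℕ) : Int) = ((g.toNat : ℕ) : Int))]
  · rw [if_neg h, if_neg (by omega : ¬ ((g'.toNat : ℕ) : Int) = ((g.toNat : ℕ) : Int))]

theorem occZ_tail (n : Int) (a : List Int) (v t : Int) (h0 : 0 ≤ t)
    (ht : t ≤ min n (a.length : Int)) (hnot : v ∉ a.take t.toNat) :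
    occZ n a v = (PySem.List.pyRange t (min n (a.length : Int)) 1).filter
      (fun i => PySem.List.pyGetD a i 0 == v) := by
  unfold occZ
  rw [PySem.List.pyRange_one_append 0 t (min n (a.length : Int)) h0 ht, List.filter_append]
  have h1 : (PySem.List.pyRange 0 t 1).filter (fun i => PySem.List.pyGetD a i 0 == v) = [] := by
    rw [List.eq_nil_iff_forall_not_mem]
    intro i hi
    rw [List.mem_filter, PySem.List.mem_pyRange_one] at hi
    obtain ⟨⟨hi0, hit⟩, hieq⟩ := hi
    rw [beq_iff_eq] at hieq
    apply hnot
    have hlt : i.toNat < a.length := by omega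
    have hieq2 : PySem.List.pyGetD a i 0 = a[i.toNat] := PySem.List.pyGetD_eq_getElem a (0 : Int) hi0 (by omega)
    rw [hieq2] at hieq
    rw [← hieq]
    exact mem_take_getElem a i.toNat t.toNat hlt (by omega)
  rw [h1, List.nil_append]

theorem altBest_inv (n : Int) (a : List Int) (hn : 1 ≤ n) :
    ∀ (d : ℕ) (t : Int) (best : List (Option Int)),
    (min n (a.length : Int) - t).toNat = d → 0 ≤ t → t ≤ min n (a.length : Int) →
    best.length = (n + 1).toNat →
    (∀ g', 0 ≤ g' → g' ≤ n →
      IsMinOpt (fun v => v ∈ a.take t.toNat ∧ G n a v = g') (PySem.List.pyGetD best g' none)) →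
    ∀ g', 0 ≤ g' → g' ≤ n →
      IsMinOpt (fun v => v ∈ a.take (min n (a.length : Int)).toNat ∧ G n a v = g')
        (PySem.List.pyGetD ((PySem.List.pyRange t (min n (a.length : Int)) 1).foldl
          (fun best idx =>
            let v := PySem.List.pyGetD a idx 0
            if (PySem.List.slice a none (some idx)).contains v then best
            else
              let p := altInner (min n (a.length : Int)) a idx v
              let g := if n - p.2 > p.1 then n - p.2 else p.1
              match PySem.List.pyGetD best g none with
              | none => PySem.List.pySetD best g (some v)
              | some b => if v < b then PySem.List.pySetD best g (some v) else best) best) g' none) := by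
  intro d
  induction d with
  | zero =>
    intro t best hd h0 ht hlen hinv g' hg0 hg1
    rw [PySem.List.pyRange_one_eq_nil (by omega)]
    simp only [List.foldl_nil]
    have hteq : t = min n (a.length : Int) := by omega
    rw [← hteq]
    exact hinv g' hg0 hg1
  | succ d ih =>
    intro t best hd h0 ht hlen hinv g' hg0 hg1
    have htlt : t < min n (a.length : Int) := by omega
    have htm : t < (a.length : Int) := by omega
    rw [PySem.List.pyRange_one_cons htlt]
    simp only [List.foldl_cons]
    have hvt : PySem.List.pyGetD a t 0 = a[t.toNat] := PySem.List.pyGetD_eq_getElem a (0 : Int) h0 (by omega)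
    have htsucc : (t + 1).toNat = t.toNat + 1 := by omega
    have htake1 : a.take (t + 1).toNat = a.take t.toNat ++ [a[t.toNat]] := by
      rw [htsucc]
      exact take_succ_eq a t.toNat (by omega)
    by_cases hctn : (PySem.List.slice a none (some t)).contains (PySem.List.pyGetD a t 0) = true
    · -- duplicate: state unchanged, prefix set unchanged
      simp only [hctn, if_true]
      have hvmem : a[t.toNat] ∈ a.take t.toNat := by
        rw [PySem.List.slice_to _ h0, hvt] at hctn
        simpa using hctn
      apply ih (t + 1) best (by omega) (by omega) (by omega) hlen _ g' hg0 hg1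
      intro g'' hg''0 hg''1
      apply IsMinOpt_congr _ (hinv g'' hg''0 hg''1)
      intro v'
      rw [htake1, List.mem_append, List.mem_singleton]
      constructor
      · rintro ⟨hm, hG⟩; exact ⟨Or.inl hm, hG⟩
      · rintro ⟨hm | rfl, hG⟩
        · exact ⟨hm, hG⟩
        · exact ⟨hvmem, hG⟩
    · -- first occurrence
      rw [Bool.not_eq_true] at hctn
      simp only [hctn, Bool.false_eq_true, if_false]
      have hvnot : a[t.toNat] ∉ a.take t.toNat := by
        intro hmem
        rw [PySem.List.slice_to _ h0, hvt] at hctn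
        simp [hmem] at hctn
      have hva : a[t.toNat] ∈ a.take (min n (a.length : Int)).toNat := by
        rw [hvt] at hctn
        exact mem_take_getElem a t.toNat (min n (a.length : Int)).toNat (by omega) (by omega)
      have hocc := occZ_tail n a a[t.toNat] t h0 (by omega) hvnot
      have hG1 : 1 ≤ G n a a[t.toNat] := G_pos n a a[t.toNat] (by omega)
      have hG2 : G n a a[t.toNat] ≤ n := G_le n a a[t.toNat] hva
      have hgval :
          (if n - (altInner (min n (a.length : Int)) a t (PySem.List.pyGetD a t 0)).2 >
              (altInner (min n (a.length : Int)) a t (PySem.List.pyGetD a t 0)).1 then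
            n - (altInner (min n (a.length : Int)) a t (PySem.List.pyGetD a t 0)).2
          else (altInner (min n (a.length : Int)) a t (PySem.List.pyGetD a t 0)).1) = G n a a[t.toNat] := by
        have hgb2 : 1 ≤ gmChain n (-1) ((PySem.List.pyRange t (min n (a.length : Int)) 1).filter
            (fun i => PySem.List.pyGetD a i 0 == a[t.toNat])) := by
          rw [← hocc]
          exact hG1
        rw [hvt]
        unfold altInner
        rw [altInner_chain a a[t.toNat] (min n (a.length : Int)) n t h0 0 (-1)]
        unfold G
        rw [hocc]
        exact max_eq_right (by omega)
      set g := G n a a[t.toNat] with hgdef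
      have hglt : g.toNat < best.length := by omega
      have hnew : ∀ best' : List (Option Int), best'.length = (n + 1).toNat →
          (∀ g'', 0 ≤ g'' → g'' ≤ n →
            IsMinOpt (fun v => v ∈ a.take (t + 1).toNat ∧ G n a v = g'')
              (PySem.List.pyGetD best' g'' none)) →
          IsMinOpt (fun v => v ∈ a.take (min n (a.length : Int)).toNat ∧ G n a v = g')
            (PySem.List.pyGetD ((PySem.List.pyRange (t + 1) (min n (a.length : Int)) 1).foldl
              (fun best idx =>
                let v := PySem.List.pyGetD a idx 0
                if (PySem.List.slice a none (some idx)).contains v then best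
                else
                  let p := altInner (min n (a.length : Int)) a idx v
                  let g := if n - p.2 > p.1 then n - p.2 else p.1
                  match PySem.List.pyGetD best g none with
                  | none => PySem.List.pySetD best g (some v)
                  | some b => if v < b then PySem.List.pySetD best g (some v) else best) best') g' none) := by
        intro best' hlen' hinv'
        exact ih (t + 1) best' (by omega) (by omega) (by omega) hlen' hinv' g' hg0 hg1
      cases hb : PySem.List.pyGetD best g none with
      | none =>
        simp only [hgval, hb]
        apply hnew
        · rw [PySem.List.length_pySetD]; omega
        · intro g'' hg''0 hg''1
          rw [pyGetD_set best g g'' none (by omega) (by omega) hglt]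
          by_cases hgg : g'' = g
          · subst hgg
            rw [if_pos rfl]
            have hempty := hinv g (by omega) (by omega)
            rw [hb] at hempty
            refine ⟨⟨by
              rw [hvt]
              have hm2 := mem_take_getElem a t.toNat (t.toNat + 1) (by omega) (by omega)
              simpa [htsucc] using hm2, by rw [hvt, hgdef]⟩, ?_⟩
            intro v' hv'
            rw [htake1, List.mem_append, List.mem_singleton] at hv'
            rcases hv'.1 with hm | rfl
            · exact absurd ⟨hm, hv'.2⟩ (hempty v')
            · exact le_of_eq hvt
          · rw [if_neg hgg]
            apply IsMinOpt_congr _ (hinv g'' hg''0 hg''1)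
            intro v'
            rw [htake1, List.mem_append, List.mem_singleton]
            constructor
            · rintro ⟨hm, hG⟩; exact ⟨Or.inl hm, hG⟩
            · rintro ⟨hm | rfl, hG⟩
              · exact ⟨hm, hG⟩
              · exact absurd hG.symm (by simpa [hgdef] using hgg)
      | some b =>
        simp only [hgval, hb]
        have hbmin := hinv g (by omega) (by omega)
        rw [hb] at hbmin
        by_cases hvb : PySem.List.pyGetD a t 0 < b
        · simp only [hvb, if_true]
          apply hnew
          · rw [PySem.List.length_pySetD]; omega
          · intro g'' hg''0 hg''1
            rw [pyGetD_set best g g'' none (by omega) (by omega) hglt]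
            by_cases hgg : g'' = g
            · subst hgg
              rw [if_pos rfl]
              refine ⟨⟨by
                rw [hvt]
                have hm2 := mem_take_getElem a t.toNat (t.toNat + 1) (by omega) (by omega)
                simpa [htsucc] using hm2, by rw [hvt, hgdef]⟩, ?_⟩
              intro v' hv'
              rw [htake1, List.mem_append, List.mem_singleton] at hv'
              rcases hv'.1 with hm | rfl
              · have := hbmin.2 v' ⟨hm, hv'.2⟩
                rw [hvt] at hvb ⊢
                omega
              · exact le_of_eq hvt
            · rw [if_neg hgg]
              apply IsMinOpt_congr _ (hinv g'' hg''0 hg''1)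
              intro v'
              rw [htake1, List.mem_append, List.mem_singleton]
              constructor
              · rintro ⟨hm, hG⟩; exact ⟨Or.inl hm, hG⟩
              · rintro ⟨hm | rfl, hG⟩
                · exact ⟨hm, hG⟩
                · exact absurd hG.symm (by simpa [hgdef] using hgg)
        · simp only [hvb, if_false]
          apply hnew best hlen
          intro g'' hg''0 hg''1
          by_cases hgg : g'' = g
          · subst hgg
            have hb' := hinv g (by omega) (by omega)
            rw [hb] at hb'
            rw [hb]
            refine ⟨⟨by
              have hm2 : b ∈ List.take t.toNat a ++ [a[t.toNat]] := List.mem_append_left _ hb'.1.1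
              rw [← take_succ_eq a t.toNat (by omega)] at hm2
              simpa [htsucc] using hm2, hb'.1.2⟩, ?_⟩
            intro v' hv'
            rw [htake1, List.mem_append, List.mem_singleton] at hv'
            rcases hv'.1 with hm | rfl
            · exact hb'.2 v' ⟨hm, hv'.2⟩
            · rw [hvt] at hvb; omega
          · apply IsMinOpt_congr _ (hinv g'' hg''0 hg''1)
            intro v'
            rw [htake1, List.mem_append, List.mem_singleton]
            constructor
            · rintro ⟨hm, hG⟩; exact ⟨Or.inl hm, hG⟩
            · rintro ⟨hm | rfl, hG⟩
              · exact ⟨hm, hG⟩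
              · exact absurd hG.symm (by simpa [hgdef] using hgg)

theorem altBest_spec (n : Int) (a : List Int) (hn : 1 ≤ n) (g' : Int) (h0 : 0 ≤ g') (h1 : g' ≤ n) :
    IsMinOpt (fun v => v ∈ a ∧ G n a v = g')
      (PySem.List.pyGetD (altBest n a) g' none) := by
  unfold altBest
  have hbase := altBest_inv n a hn (min n (a.length : Int) - 0).toNat 0
    (List.replicate (n + 1).toNat (none : Option Int)) rfl (le_refl 0) (by omega)
    (by simp) ?_ g' h0 h1
  · apply IsMinOpt_congr _ hbase
    intro v
    constructor
    · rintro ⟨hm, hG⟩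
      exact ⟨List.mem_of_mem_take hm, hG⟩
    · rintro ⟨hm, hG⟩
      refine ⟨mem_take_of_G_le n a v (by omega) (by omega), hG⟩
  · intro g'' hg''0 hg''1
    have hrep : PySem.List.pyGetD (List.replicate (n + 1).toNat (none : Option Int)) g'' none = none := by
      rcases ho : PySem.List.pyGet? (List.replicate (n + 1).toNat (none : Option Int)) g'' with _ | o
      · unfold PySem.List.pyGetD
        rw [ho]
        rfl
      · have hmem := PySem.List.mem_of_pyGet?_eq_some _ ho
        have ho2 := List.eq_of_mem_replicate hmem
        subst ho2
        unfold PySem.List.pyGetD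
        rw [ho]
        rfl
    rw [hrep]
    intro v hv
    simp at hv

def altFState (n : Int) (a : List Int) (t : Int) : List Int × Option Int :=
  (PySem.List.pyRange 1 (t + 1) 1).foldl
    (fun (p : List Int × Option Int) k =>
      let b := PySem.List.pyGetD (altBest n a) k none
      let cur := match b, p.2 with
        | some bv, none => some bv
        | some bv, some c => if bv < c then some bv else some c
        | none, c => c
      (PySem.List.pySetD p.1 k (cur.getD (-1)), cur))
    (List.replicate (n + 1).toNat (0 : Int), none)

theorem altF_inv (n : Int) (a : List Int) (hn : 1 ≤ n) : ∀ t : ℕ, (t : Int) ≤ n →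
    (altFState n a (t : Int)).1.length = (n + 1).toNat ∧
    IsMinOpt (fun v => v ∈ a ∧ G n a v ≤ (t : Int)) (altFState n a (t : Int)).2 ∧
    (∀ k : Int, 1 ≤ k → k ≤ (t : Int) →
      IsRes (fun v => v ∈ a ∧ G n a v ≤ k) (PySem.List.pyGetD (altFState n a (t : Int)).1 k 0)) := by
  intro t
  induction t with
  | zero =>
    intro _
    unfold altFState
    rw [PySem.List.pyRange_one_eq_nil (by omega)]
    simp only [List.foldl_nil]
    refine ⟨by simp, ?_, ?_⟩
    · intro v hv
      have := G_pos n a v (by omega)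
      omega
    · intro k hk1 hk2
      exfalso; omega
  | succ t ih =>
    intro hle
    have hcast : ((t + 1 : ℕ) : Int) = (t : Int) + 1 := by push_cast; ring
    obtain ⟨hlen, hcur, hent⟩ := ih (by omega)
    have hsucc : altFState n a ((t : Int) + 1) =
        (let p := altFState n a (t : Int)
         let b := PySem.List.pyGetD (altBest n a) ((t : Int) + 1) none
         let cur := match b, p.2 with
           | some bv, none => some bv
           | some bv, some c => if bv < c then some bv else some c
           | none, c => c
         (PySem.List.pySetD p.1 ((t : Int) + 1) (cur.getD (-1)), cur)) := by
      unfold altFState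
      rw [PySem.List.pyRange_one_succ_right (by omega : (1 : Int) ≤ (t : Int) + 1), List.foldl_append]
      simp only [List.foldl_cons, List.foldl_nil]
    have hbspec := altBest_spec n a hn ((t : Int) + 1) (by omega) (by omega)
    rw [hcast, hsucc]
    have hsetiff : ∀ v, (v ∈ a ∧ G n a v ≤ (t : Int) + 1) ↔
        ((v ∈ a ∧ G n a v ≤ (t : Int)) ∨ (v ∈ a ∧ G n a v = (t : Int) + 1)) := by
      intro v
      constructor
      · rintro ⟨hv, hG⟩
        rcases lt_or_eq_of_le hG with h | h
        · exact Or.inl ⟨hv, by omega⟩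
        · exact Or.inr ⟨hv, h⟩
      · rintro (⟨hv, hG⟩ | ⟨hv, hG⟩) <;> exact ⟨hv, by omega⟩
    have hcur' : IsMinOpt (fun v => v ∈ a ∧ G n a v ≤ (t : Int) + 1)
        (match PySem.List.pyGetD (altBest n a) ((t : Int) + 1) none,
               (altFState n a (t : Int)).2 with
         | some bv, none => some bv
         | some bv, some c => if bv < c then some bv else some c
         | none, c => c) := by
      rcases hbv : PySem.List.pyGetD (altBest n a) ((t : Int) + 1) none with _ | bv <;>
        rcases hc : (altFState n a (t : Int)).2 with _ | c
      · rw [hbv] at hbspec; rw [hc] at hcur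
        intro v hv
        rcases (hsetiff v).mp hv with h | h
        · exact hcur v h
        · exact hbspec v h
      · rw [hbv] at hbspec; rw [hc] at hcur
        refine ⟨(hsetiff c).mpr (Or.inl hcur.1), ?_⟩
        intro v hv
        rcases (hsetiff v).mp hv with h | h
        · exact hcur.2 v h
        · exact absurd h (hbspec v)
      · rw [hbv] at hbspec; rw [hc] at hcur
        refine ⟨(hsetiff bv).mpr (Or.inr hbspec.1), ?_⟩
        intro v hv
        rcases (hsetiff v).mp hv with h | h
        · exact absurd h (hcur v)
        · exact hbspec.2 v h
      · rw [hbv] at hbspec; rw [hc] at hcur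
        dsimp only
        by_cases hlt : bv < c
        · rw [if_pos hlt]
          refine ⟨(hsetiff bv).mpr (Or.inr hbspec.1), ?_⟩
          intro v hv
          rcases (hsetiff v).mp hv with h | h
          · have := hcur.2 v h; omega
          · exact hbspec.2 v h
        · rw [if_neg hlt]
          refine ⟨(hsetiff c).mpr (Or.inl hcur.1), ?_⟩
          intro v hv
          rcases (hsetiff v).mp hv with h | h
          · exact hcur.2 v h
          · have := hbspec.2 v h; omega
    refine ⟨?_, ?_, ?_⟩
    · simp only []
      rw [PySem.List.length_pySetD]
      exact hlen
    · simp only []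
      exact hcur'
    · simp only []
      intro k hk1 hk2
      rw [pyGetD_set _ ((t : Int) + 1) k 0 (by omega) (by omega) (by omega)]
      by_cases hkt : k = (t : Int) + 1
      · rw [if_pos hkt]
        subst hkt
        rcases hm : (match PySem.List.pyGetD (altBest n a) ((t : Int) + 1) none,
               (altFState n a (t : Int)).2 with
         | some bv, none => some bv
         | some bv, some c => if bv < c then some bv else some c
         | none, c => c) with _ | x
        · rw [hm] at hcur'
          rw [hm]
          exact Or.inl ⟨hcur', rfl⟩
        · rw [hm] at hcur'
          rw [hm]
          exact Or.inr ⟨hcur'.1, hcur'.2⟩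
      · rw [if_neg hkt]
        exact hent k hk1 (by omega)

theorem altF_spec (n : Int) (a : List Int) (hn : 1 ≤ n) (k : Int) (hk1 : 1 ≤ k) (hk2 : k ≤ n) :
    IsRes (fun v => v ∈ a ∧ G n a v ≤ k) (PySem.List.pyGetD (altF n a) k 0) := by
  have heq : altF n a = (altFState n a ((n.toNat : ℕ) : Int)).1 := by
    unfold altF altFState
    have : ((n.toNat : ℕ) : Int) + 1 = n + 1 := by omega
    rw [this]
  rw [heq]
  exact (altF_inv n a hn n.toNat (by omega)).2.2 k hk1 (by omega)

-- ===== tables agree, drivers agree =====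

theorem tables_eq (n : Int) (a : List Int) (hn : 1 ≤ n) (k : Int) (hk1 : 1 ≤ k) (hk2 : k ≤ n) :
    PySem.List.pyGetD (altF n a) k 0 = get_amazing_number n a k :=
  IsRes_unique (altF_spec n a hn k hk1 hk2) (A_IsRes n a k hk1 hk2)

theorem loop_congr (n : Int) (a : List Int) (f : List Int)
    (hf : ∀ k : Int, 2 ≤ k → k ≤ n → PySem.List.pyGetD f k 0 = get_amazing_number n a k) :
    ∀ (d : ℕ) (sol : List Int) (l r : Int), (r - l).toNat = d → 1 ≤ l → r ≤ n - 1 →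
      altLoop f sol l r = solveLoop n a sol l r := by
  intro d
  induction d using Nat.strong_induction_on with
  | _ d ih =>
    intro sol l r hd hl hr
    rw [altLoop, solveLoop]
    by_cases hlr : l < r
    · rw [if_pos hlr, if_pos hlr]
      rw [hf (l + 1) (by omega) (by omega), hf (r + 1) (by omega) (by omega)]
      dsimp only
      split_ifs with hne
      · exact ih ((r - 1) - (l + 1)).toNat (by omega) _ (l + 1) (r - 1) rfl (by omega) (by omega)
      · rfl
    · rw [if_neg hlr, if_neg hlr]

-- ===== VERDICT (by name: the statement is the Claim_ definition above) =====
theorem solve_spec : Claim_equal_solve := by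
  intro n a _ hpre
  obtain ⟨hn, ha⟩ := hpre
  unfold Spec_solve solve solve_alt
  simp only []
  rw [loop_congr n a (altF n a)
    (fun k hk1 hk2 => tables_eq n a hn k (by omega) hk2)
    ((n - 1) - 1).toNat _ 1 (n - 1) rfl (le_refl 1) (le_refl _)]
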